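-- pv_equiv track=rewrite | github.com/fullstorydev/pathing-utils | pathutils/frequent_funnel.py | get_funnels_for_session
-- ===== SOURCE A (Python) =====
-- def get_funnels_for_session(pathlist, url, funlen):
--     funnelSet = set()
--     if len(pathlist) < funlen:
--         return funnelSet
--     indices = [i for i,x in enumerate(pathlist) if x == url]
--     for ix in indices:
--         if ix - funlen + 1 >= 0:
--             startSubfunnel = ix - funlen + 1
--         else:
--             startSubfunnel = 0
--         if ix + funlen >= len(pathlist):
--             endSubfunnel = len(pathlist) - 1
--         else:
--             endSubfunnel = ix + funlen - 1
--         start = startSubfunnel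
--         while(True):
--             funnelSet.add(tuple(pathlist[start:start + funlen]))
--             if start + funlen - 1 == endSubfunnel:
--                 break
--             start += 1
--     return funnelSet
-- ===== SOURCE B (Python) =====
-- def get_funnels_for_session(pathlist, url, funlen):
--     funnelSet = set()
--     n = len(pathlist)
--     if n < funlen:
--         return funnelSet
--     if funlen < 1:
--         # a window of non-positive length is empty and can never contain url
--         return funnelSet
--     # slide a window of length funlen over pathlist, maintaining the number of
--     # occurrences of url inside it; emit every window that contains url
--     count = pathlist[:funlen].count(url)
--     for start in range(n - funlen + 1):
--         if start > 0:
--             if pathlist[start - 1] == url: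
--                 count -= 1
--             if pathlist[start + funlen - 1] == url:
--                 count += 1
--         if count > 0:
--             funnelSet.add(tuple(pathlist[start:start + funlen]))
--     return funnelSet
-- ===== Notes on version B (the rewrite author's own statement) =====
-- stated objective: alternative
-- what changed: Instead of A's per-occurrence enumeration of overlapping subwindows (an indices pass plus a nested while loop re-slicing around every occurrence, deduplicated by the set), B makes one sliding-window pass over all start positions, maintaining a running count of url occurrences in the current window, and emits each window whose count is positive; B also returns at once for funlen < 1, where A's inner loop never terminates when url occurs.
import Mathlib
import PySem

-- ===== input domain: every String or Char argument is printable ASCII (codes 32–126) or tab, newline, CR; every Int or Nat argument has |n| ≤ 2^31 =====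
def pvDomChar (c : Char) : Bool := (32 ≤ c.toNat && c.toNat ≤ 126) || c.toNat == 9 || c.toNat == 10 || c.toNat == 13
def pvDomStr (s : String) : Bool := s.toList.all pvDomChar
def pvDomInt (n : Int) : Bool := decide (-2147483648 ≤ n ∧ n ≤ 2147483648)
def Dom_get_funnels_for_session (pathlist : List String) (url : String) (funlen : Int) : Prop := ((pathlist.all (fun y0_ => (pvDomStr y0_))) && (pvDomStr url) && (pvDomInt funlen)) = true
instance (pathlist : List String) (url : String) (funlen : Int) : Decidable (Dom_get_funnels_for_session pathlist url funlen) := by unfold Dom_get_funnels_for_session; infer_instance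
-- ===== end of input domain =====

-- B replaces A's per-occurrence enumeration of overlapping subwindows by one sliding-window pass
-- over all start positions with a running occurrence count (objective: alternative algorithm).

-- ===== PORT A =====
-- the 'while True' inner loop of A, with fuel (pathlist.length + 1 always suffices on Pre_)
def pvWhileA (pathlist : List String) (funlen : Int) (endSub : Int) :
    Nat → Int → List (List String) → List (List String)
  | 0, _, acc => acc
  | fuel + 1, start, acc =>
    let acc' := PySem.Set.add acc (PySem.List.slice pathlist (some start) (some (start + funlen)))
    if start + funlen - 1 = endSub then acc'
    else pvWhileA pathlist funlen endSub fuel (start + 1) acc'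

def get_funnels_for_session (pathlist : List String) (url : String) (funlen : Int) : List (List String) :=
  let funnelSet : PySem.Set (List String) := PySem.Set.empty
  if (pathlist.length : Int) < funlen then funnelSet
  else
    let indices : List Int := ((PySem.List.enumerate pathlist).filter (fun p => p.2 == url)).map (fun p => p.1)
    indices.foldl (fun acc ix =>
      let startSubfunnel : Int := if ix - funlen + 1 ≥ 0 then ix - funlen + 1 else 0
      let endSubfunnel : Int := if ix + funlen ≥ (pathlist.length : Int) then (pathlist.length : Int) - 1 else ix + funlen - 1
      pvWhileA pathlist funlen endSubfunnel (pathlist.length + 1) startSubfunnel acc) funnelSet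

-- ===== PORT B =====
def get_funnels_for_session_alt (pathlist : List String) (url : String) (funlen : Int) : List (List String) :=
  let funnelSet : PySem.Set (List String) := PySem.Set.empty
  let n : Int := pathlist.length
  if n < funlen then funnelSet
  else if funlen < 1 then funnelSet
  else
    let count0 : Int := PySem.List.count (PySem.List.slice pathlist none (some funlen)) url
    ((PySem.List.pyRange 0 (n - funlen + 1) 1).foldl (fun (st : PySem.Set (List String) × Int) start =>
      let count : Int :=
        if start > 0 then
          let ca := if PySem.List.pyGetD pathlist (start - 1) "" == url then st.2 - 1 else st.2
          if PySem.List.pyGetD pathlist (start + funlen - 1) "" == url then ca + 1 else ca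
        else st.2
      let fs := if count > 0 then
          PySem.Set.add st.1 (PySem.List.slice pathlist (some start) (some (start + funlen)))
        else st.1
      (fs, count)) (funnelSet, count0)).1

-- ===== PRECONDITION & SPEC =====
-- Pre_ excludes only inputs where A never returns: with funlen ≤ 0 and url present in pathlist,
-- A's inner 'while True' loop never meets its exit condition and loops forever.
def Pre_get_funnels_for_session (pathlist : List String) (url : String) (funlen : Int) : Prop :=
  1 ≤ funlen ∨ url ∉ pathlist
instance (pathlist : List String) (url : String) (funlen : Int) : Decidable (Pre_get_funnels_for_session pathlist url funlen) := by unfold Pre_get_funnels_for_session; infer_instance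

def pvWitness_get_funnels_for_session : List String × String × Int := (["a", "b", "a"], "a", 2)

def Spec_get_funnels_for_session (pathlist : List String) (url : String) (funlen : Int) (out : List (List String)) : Prop := out = get_funnels_for_session_alt pathlist url funlen
instance (pathlist : List String) (url : String) (funlen : Int) (out : List (List String)) : Decidable (Spec_get_funnels_for_session pathlist url funlen out) := by unfold Spec_get_funnels_for_session; infer_instance

-- ===== CLAIM (what is proved, stated in full; the proofs are below) =====
def Claim_equal_get_funnels_for_session : Prop := ∀ (pathlist : List String) (url : String) (funlen : Int), Dom_get_funnels_for_session pathlist url funlen → Pre_get_funnels_for_session pathlist url funlen → Spec_get_funnels_for_session pathlist url funlen (get_funnels_for_session pathlist url funlen)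

-- ===== LEMMAS AND PROOFS =====

-- the window starting at t
def pvW (pathlist : List String) (funlen t : Int) : List String :=
  PySem.List.slice pathlist (some t) (some (t + funlen))

-- A-side accumulation over a list of starts
def pvFoldAdd (pathlist : List String) (funlen : Int) (acc : List (List String)) (l : List Int) : List (List String) :=
  l.foldl (fun a t => PySem.Set.add a (pvW pathlist funlen t)) acc

-- B-side accumulation over a list of starts
def pvFoldB (pathlist : List String) (url : String) (funlen : Int) (acc : List (List String)) (l : List Int) : List (List String) :=
  l.foldl (fun a t => if url ∈ pvW pathlist funlen t then PySem.Set.add a (pvW pathlist funlen t) else a) acc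

theorem pvFoldAdd_mem (pathlist : List String) (funlen : Int) (acc : List (List String)) (l : List Int) (y : List String) :
    y ∈ pvFoldAdd pathlist funlen acc l ↔ y ∈ acc ∨ ∃ t ∈ l, y = pvW pathlist funlen t := by
  unfold pvFoldAdd
  exact PySem.Set.mem_foldl_add l (pvW pathlist funlen) acc y

theorem pvFoldAdd_absorb (pathlist : List String) (funlen : Int) (acc : List (List String)) (l : List Int)
    (h : ∀ t ∈ l, pvW pathlist funlen t ∈ acc) : pvFoldAdd pathlist funlen acc l = acc := by
  induction l generalizing acc with
  | nil => rfl
  | cons t l ih =>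
    unfold pvFoldAdd at *
    simp only [List.foldl_cons]
    rw [PySem.Set.add_of_mem (h t (by simp))]
    exact ih acc (fun t ht => h t (by simp [ht]))

theorem pvFoldB_skip (pathlist : List String) (url : String) (funlen : Int) (acc : List (List String)) (l : List Int)
    (h : ∀ t ∈ l, url ∉ pvW pathlist funlen t) : pvFoldB pathlist url funlen acc l = acc := by
  induction l generalizing acc with
  | nil => rfl
  | cons t l ih =>
    unfold pvFoldB at *
    simp only [List.foldl_cons, if_neg (h t (by simp))]
    exact ih acc (fun t ht => h t (by simp [ht]))

theorem pvFoldB_all (pathlist : List String) (url : String) (funlen : Int) (acc : List (List String)) (l : List Int)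
    (h : ∀ t ∈ l, url ∈ pvW pathlist funlen t) :
    pvFoldB pathlist url funlen acc l = pvFoldAdd pathlist funlen acc l := by
  induction l generalizing acc with
  | nil => rfl
  | cons t l ih =>
    unfold pvFoldB pvFoldAdd at *
    simp only [List.foldl_cons, if_pos (h t (by simp))]
    exact ih _ (fun t ht => h t (by simp [ht]))

theorem pvWhileA_eq (pathlist : List String) (funlen : Int) :
    ∀ (fuel : Nat) (s hi : Int) (acc : List (List String)), s ≤ hi → hi - s < (fuel : Int) →
    pvWhileA pathlist funlen (hi + funlen - 1) fuel s acc
      = pvFoldAdd pathlist funlen acc (PySem.List.pyRange s (hi + 1) 1) := by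
  intro fuel
  induction fuel with
  | zero => intro s hi acc hsh hfuel; simp at hfuel; omega
  | succ fuel ih =>
    intro s hi acc hsh hfuel
    unfold pvWhileA
    by_cases hstop : s + funlen - 1 = hi + funlen - 1
    · have hs : s = hi := by omega
      subst hs
      rw [if_pos hstop, PySem.List.pyRange_one_singleton]
      rfl
    · have hslt : s < hi := by omega
      rw [if_neg hstop, ih (s + 1) hi _ (by omega) (by push_cast at hfuel ⊢; omega)]
      conv_rhs => rw [PySem.List.pyRange_one_cons (show s < hi + 1 by omega)]
      rfl

-- window membership ↔ an occurrence inside the window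
theorem pv_mem_slice_iff (pathlist : List String) (url : String) (funlen t : Int)
    (ht : 0 ≤ t) (_htf : t ≤ (pathlist.length : Int) - funlen) (hf : 1 ≤ funlen) :
    url ∈ pvW pathlist funlen t ↔
      ∃ k : Nat, (t ≤ (k : Int) ∧ (k : Int) ≤ t + funlen - 1) ∧ ∃ h : k < pathlist.length, pathlist[k] = url := by
  unfold pvW
  rw [PySem.List.slice_toNat pathlist (by omega) (by omega)]
  have hft : (t + funlen).toNat - t.toNat = funlen.toNat := by omega
  rw [hft, List.mem_iff_getElem?]
  constructor
  · rintro ⟨i, hi⟩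
    have hilt : i < funlen.toNat := by
      by_contra hge
      rw [List.getElem?_eq_none (by simp [List.length_take, List.length_drop]; omega)] at hi
      simp at hi
    rw [List.getElem?_take_of_lt hilt, List.getElem?_drop] at hi
    obtain ⟨hlt, heq⟩ := List.getElem?_eq_some_iff.mp hi
    exact ⟨t.toNat + i, ⟨by omega, by omega⟩, hlt, heq⟩
  · rintro ⟨k, ⟨hk1, hk2⟩, hklen, hkeq⟩
    refine ⟨k - t.toNat, ?_⟩
    have hklt : k - t.toNat < funlen.toNat := by omega
    rw [List.getElem?_take_of_lt hklt, List.getElem?_drop]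
    have hsum : t.toNat + (k - t.toNat) = k := by omega
    rw [hsum, List.getElem?_eq_some_iff]
    exact ⟨hklen, hkeq⟩

theorem pvFoldAdd_append (pathlist : List String) (funlen : Int) (acc : List (List String)) (l1 l2 : List Int) :
    pvFoldAdd pathlist funlen acc (l1 ++ l2) = pvFoldAdd pathlist funlen (pvFoldAdd pathlist funlen acc l1) l2 := by
  unfold pvFoldAdd; rw [List.foldl_append]

theorem pvFoldB_append (pathlist : List String) (url : String) (funlen : Int) (acc : List (List String)) (l1 l2 : List Int) :
    pvFoldB pathlist url funlen acc (l1 ++ l2) = pvFoldB pathlist url funlen (pvFoldB pathlist url funlen acc l1) l2 := by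
  unfold pvFoldB; rw [List.foldl_append]

-- the heart: A's per-occurrence accumulation equals B's left-to-right scan from b on
theorem pv_main (pathlist : List String) (url : String) (funlen : Int)
    (hf : 1 ≤ funlen) (hfn : funlen ≤ (pathlist.length : Int)) :
    ∀ (occs : List Int) (b : Int) (acc : List (List String)),
    0 ≤ b →
    occs.Pairwise (· < ·) →
    (∀ ix ∈ occs, 0 ≤ ix ∧ ix < (pathlist.length : Int)) →
    (∀ ix ∈ occs, b ≤ min ix ((pathlist.length : Int) - funlen) + 1) →
    (∀ t, b ≤ t → t ≤ (pathlist.length : Int) - funlen →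
      (url ∈ pvW pathlist funlen t ↔ ∃ ix ∈ occs, t ≤ ix ∧ ix ≤ t + funlen - 1)) →
    (∀ ix ∈ occs, ∀ s, max (ix - funlen + 1) 0 ≤ s → s < b → pvW pathlist funlen s ∈ acc) →
    occs.foldl (fun a ix =>
        pvWhileA pathlist funlen (min (ix + funlen - 1) ((pathlist.length : Int) - 1)) (pathlist.length + 1)
          (max (ix - funlen + 1) 0) a) acc
      = pvFoldB pathlist url funlen acc (PySem.List.pyRange b ((pathlist.length : Int) - funlen + 1) 1) := by
  intro occs
  induction occs with
  | nil =>
    intro b acc hb0 _ _ _ hP _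
    simp only [List.foldl_nil]
    rw [pvFoldB_skip]
    intro t ht hmem
    rw [PySem.List.mem_pyRange_one] at ht
    rcases (hP t (by omega) (by omega)).mp hmem with ⟨ix, hix, _⟩
    simp at hix
  | cons ix occs ih =>
    intro b acc hb0 hpair hrange hb hP hacc
    obtain ⟨hix0, hixn⟩ := hrange ix (List.mem_cons_self)
    have hbhi : b ≤ min ix ((pathlist.length : Int) - funlen) + 1 := hb ix (List.mem_cons_self)
    have hlohi : max (ix - funlen + 1) 0 ≤ min ix ((pathlist.length : Int) - funlen) := by omega
    have hgt : ∀ j ∈ occs, ix < j := fun j hj => (List.pairwise_cons.mp hpair).1 j hj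
    simp only [List.foldl_cons]
    have hend : min (ix + funlen - 1) ((pathlist.length : Int) - 1)
        = min ix ((pathlist.length : Int) - funlen) + funlen - 1 := by omega
    rw [hend, pvWhileA_eq pathlist funlen (pathlist.length + 1) (max (ix - funlen + 1) 0)
        (min ix ((pathlist.length : Int) - funlen)) acc hlohi (by push_cast; omega)]
    -- absorb the already-seen prefix of A's range
    rw [PySem.List.pyRange_one_append (max (ix - funlen + 1) 0) (max (max (ix - funlen + 1) 0) b)
        (min ix ((pathlist.length : Int) - funlen) + 1) (by omega) (by omega),
      pvFoldAdd_append,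
      pvFoldAdd_absorb pathlist funlen acc _ (by
        intro t ht
        rw [PySem.List.mem_pyRange_one] at ht
        exact hacc ix (List.mem_cons_self) t (by omega) (by omega))]
    -- split B's range into skipped / added / remaining parts
    rw [PySem.List.pyRange_one_append b (max (max (ix - funlen + 1) 0) b)
        ((pathlist.length : Int) - funlen + 1) (by omega) (by omega),
      PySem.List.pyRange_one_append (max (max (ix - funlen + 1) 0) b)
        (min ix ((pathlist.length : Int) - funlen) + 1) ((pathlist.length : Int) - funlen + 1) (by omega) (by omega),
      pvFoldB_append, pvFoldB_append,
      pvFoldB_skip pathlist url funlen acc _ (by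
        intro t ht hmem
        rw [PySem.List.mem_pyRange_one] at ht
        rcases (hP t (by omega) (by omega)).mp hmem with ⟨j, hj, hj1, hj2⟩
        rcases List.mem_cons.mp hj with rfl | hj'
        · omega
        · have := hgt j hj'; omega),
      pvFoldB_all pathlist url funlen acc _ (by
        intro t ht
        rw [PySem.List.mem_pyRange_one] at ht
        exact (hP t (by omega) (by omega)).mpr ⟨ix, List.mem_cons_self, by omega, by omega⟩)]
    -- recurse on the remaining occurrences from b' = hi + 1
    exact ih (min ix ((pathlist.length : Int) - funlen) + 1)
      (pvFoldAdd pathlist funlen acc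
        (PySem.List.pyRange (max (max (ix - funlen + 1) 0) b) (min ix ((pathlist.length : Int) - funlen) + 1) 1))
      (by omega)
      (List.pairwise_cons.mp hpair).2
      (fun j hj => hrange j (List.mem_cons_of_mem ix hj))
      (by intro j hj; have := hgt j hj; omega)
      (by
        intro t ht1 ht2
        rw [hP t (by omega) ht2]
        constructor
        · rintro ⟨j, hj, hj1, hj2⟩
          rcases List.mem_cons.mp hj with rfl | hj'
          · omega
          · exact ⟨j, hj', hj1, hj2⟩
        · rintro ⟨j, hj, hj1, hj2⟩
          exact ⟨j, List.mem_cons_of_mem ix hj, hj1, hj2⟩)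
      (by
        intro j hj s hs1 hs2
        have hjix := hgt j hj
        by_cases hsb : s < b
        · exact (pvFoldAdd_mem pathlist funlen acc _ _).mpr
            (Or.inl (hacc j (List.mem_cons_of_mem ix hj) s hs1 hsb))
        · exact (pvFoldAdd_mem pathlist funlen acc _ _).mpr
            (Or.inr ⟨s, by rw [PySem.List.mem_pyRange_one]; omega, rfl⟩))

theorem pvFoldB_cons (pathlist : List String) (url : String) (funlen : Int) (acc : List (List String)) (t : Int) (l : List Int) :
    pvFoldB pathlist url funlen acc (t :: l)
      = pvFoldB pathlist url funlen
          (if url ∈ pvW pathlist funlen t then PySem.Set.add acc (pvW pathlist funlen t) else acc) l := rfl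

theorem pv_count_pos (pathlist : List String) (url : String) (funlen t : Int) :
    ((PySem.List.count (pvW pathlist funlen t) url : Int) > 0) ↔ url ∈ pvW pathlist funlen t := by
  show ((List.count url (pvW pathlist funlen t) : Int) > 0) ↔ _
  rw [← List.count_pos_iff]
  omega

theorem pv_count_shift (pathlist : List String) (url : String) (funlen b : Int)
    (hf : 1 ≤ funlen) (hb : 1 ≤ b) (hbn : b ≤ (pathlist.length : Int) - funlen) :
    (PySem.List.count (pvW pathlist funlen b) url : Int)
      = (PySem.List.count (pvW pathlist funlen (b - 1)) url : Int)
        - (if PySem.List.pyGetD pathlist (b - 1) "" == url then 1 else 0)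
        + (if PySem.List.pyGetD pathlist (b + funlen - 1) "" == url then 1 else 0) := by
  obtain ⟨a, ha⟩ : ∃ a : Nat, b - 1 = (a : Int) := ⟨(b - 1).toNat, by omega⟩
  obtain ⟨m, hm⟩ : ∃ m : Nat, funlen = (m : Int) + 1 := ⟨(funlen - 1).toNat, by omega⟩
  have hlen : a + m + 2 ≤ pathlist.length := by omega
  unfold pvW
  rw [PySem.List.slice_toNat pathlist (by omega) (by omega),
      PySem.List.slice_toNat pathlist (by omega) (by omega)]
  have h1 : (b + funlen).toNat - b.toNat = m + 1 := by omega
  have h2 : b.toNat = a + 1 := by omega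
  have h3 : (b - 1 + funlen).toNat - (b - 1).toNat = m + 1 := by omega
  have h4 : (b - 1).toNat = a := by omega
  rw [h1, h2, h3, h4]
  have e1 : (pathlist.drop a).take (m + 1)
      = pathlist[a]'(by omega) :: (pathlist.drop (a + 1)).take m := by
    rw [List.drop_eq_getElem_cons (by omega), List.take_succ_cons]
  have e2 : (pathlist.drop (a + 1)).take (m + 1)
      = (pathlist.drop (a + 1)).take m ++ [pathlist[a + 1 + m]'(by omega)] := by
    rw [List.take_add_one]
    congr 1
    rw [List.getElem?_drop, List.getElem?_eq_getElem (by omega)]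
    rfl
  rw [PySem.List.pyGetD_eq_getElem pathlist "" (by omega) (by omega),
      PySem.List.pyGetD_eq_getElem pathlist "" (by omega) (by omega)]
  have h5 : (b - 1).toNat = a := by omega
  have h6 : (b + funlen - 1).toNat = a + 1 + m := by omega
  simp only [h5, h6]
  show ((List.count url ((pathlist.drop (a + 1)).take (m + 1)) : Int)) = _
  rw [e2, List.count_append]
  show _ = ((List.count url ((pathlist.drop a).take (m + 1)) : Int)) - _ + _
  rw [e1, List.count_cons]
  simp only [List.count_cons, List.count_nil, beq_iff_eq]
  split_ifs <;> push_cast <;> omega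

theorem pv_altloop (pathlist : List String) (url : String) (funlen : Int)
    (hf : 1 ≤ funlen) :
    ∀ (k : Nat) (b : Int) (acc : List (List String)) (c : Int),
    1 ≤ b → b + k = (pathlist.length : Int) - funlen + 1 →
    c = (PySem.List.count (pvW pathlist funlen (b - 1)) url : Int) →
    ((PySem.List.pyRange b ((pathlist.length : Int) - funlen + 1) 1).foldl
        (fun (st : PySem.Set (List String) × Int) start =>
          let count : Int :=
            if start > 0 then
              let ca := if PySem.List.pyGetD pathlist (start - 1) "" == url then st.2 - 1 else st.2
              if PySem.List.pyGetD pathlist (start + funlen - 1) "" == url then ca + 1 else ca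
            else st.2
          let fs := if count > 0 then
              PySem.Set.add st.1 (PySem.List.slice pathlist (some start) (some (start + funlen)))
            else st.1
          (fs, count)) (acc, c)).1
      = pvFoldB pathlist url funlen acc (PySem.List.pyRange b ((pathlist.length : Int) - funlen + 1) 1) := by
  intro k
  induction k with
  | zero =>
    intro b acc c hb1 hbk _
    rw [PySem.List.pyRange_one_eq_nil (by omega)]
    rfl
  | succ k ih =>
    intro b acc c hb1 hbk hc
    rw [PySem.List.pyRange_one_cons (by omega)]
    simp only [List.foldl_cons]
    have hgt : b > 0 := by omega
    have hshift := pv_count_shift pathlist url funlen b hf hb1 (by omega)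
    have hcount : (if PySem.List.pyGetD pathlist (b + funlen - 1) "" == url then
          (if PySem.List.pyGetD pathlist (b - 1) "" == url then c - 1 else c) + 1
        else (if PySem.List.pyGetD pathlist (b - 1) "" == url then c - 1 else c))
        = (PySem.List.count (pvW pathlist funlen b) url : Int) := by
      rw [hshift, hc]
      split_ifs <;> omega
    simp only [if_pos hgt, hcount, pvFoldB_cons]
    have hsl : PySem.List.slice pathlist (some b) (some (b + funlen)) = pvW pathlist funlen b := rfl
    rw [hsl]
    by_cases hmem : url ∈ pvW pathlist funlen b
    · rw [if_pos ((pv_count_pos pathlist url funlen b).mpr hmem), if_pos hmem]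
      exact ih (b + 1) _ _ (by omega) (by omega) (by rw [show b + 1 - 1 = b by ring])
    · rw [if_neg (fun h => hmem ((pv_count_pos pathlist url funlen b).mp h)), if_neg hmem]
      exact ih (b + 1) _ _ (by omega) (by omega) (by rw [show b + 1 - 1 = b by ring])

theorem pv_alt_eq (pathlist : List String) (url : String) (funlen : Int)
    (hf : 1 ≤ funlen) (hfn : funlen ≤ (pathlist.length : Int)) :
    get_funnels_for_session_alt pathlist url funlen
      = pvFoldB pathlist url funlen PySem.Set.empty
          (PySem.List.pyRange 0 ((pathlist.length : Int) - funlen + 1) 1) := by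
  unfold get_funnels_for_session_alt
  rw [if_neg (show ¬((pathlist.length : Int) < funlen) by omega), if_neg (show ¬(funlen < 1) by omega)]
  have hc0 : (PySem.List.count (PySem.List.slice pathlist none (some funlen)) url : Int)
      = (PySem.List.count (pvW pathlist funlen 0) url : Int) := by
    unfold pvW
    rw [PySem.List.slice_to pathlist (by omega),
        PySem.List.slice_toNat pathlist le_rfl (by omega)]
    norm_num
  rw [PySem.List.pyRange_one_cons (by omega)]
  simp only [List.foldl_cons, pvFoldB_cons]
  have hngt : ¬((0 : Int) > 0) := by omega
  simp only [if_neg hngt, hc0]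
  have hsl : PySem.List.slice pathlist (some 0) (some (0 + funlen)) = pvW pathlist funlen 0 := rfl
  rw [hsl]
  by_cases hmem : url ∈ pvW pathlist funlen 0
  · rw [if_pos ((pv_count_pos pathlist url funlen 0).mpr hmem), if_pos hmem]
    exact pv_altloop pathlist url funlen hf ((pathlist.length : Int) - funlen).toNat 1 _ _
      le_rfl (by omega) (by norm_num)
  · rw [if_neg (fun h => hmem ((pv_count_pos pathlist url funlen 0).mp h)), if_neg hmem]
    exact pv_altloop pathlist url funlen hf ((pathlist.length : Int) - funlen).toNat 1 _ _
      le_rfl (by omega) (by norm_num)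

theorem pv_start_eq (i f : Int) : (if i - f + 1 ≥ 0 then i - f + 1 else 0) = max (i - f + 1) 0 := by
  split_ifs <;> omega

theorem pv_end_eq (i f n : Int) : (if i + f ≥ n then n - 1 else i + f - 1) = min (i + f - 1) (n - 1) := by
  split_ifs <;> omega

theorem pv_mem_indices (pathlist : List String) (url : String) (ix : Int) :
    ix ∈ ((PySem.List.enumerate pathlist).filter (fun p => p.2 == url)).map (fun p => p.1) ↔
      ∃ k : Nat, (k : Int) = ix ∧ ∃ h : k < pathlist.length, pathlist[k] = url := by
  simp only [List.mem_map, List.mem_filter, PySem.List.mem_enumerate_iff]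
  constructor
  · rintro ⟨p, ⟨⟨k, hk, rfl⟩, hurl⟩, rfl⟩
    exact ⟨k, by omega, hk, by simpa using hurl⟩
  · rintro ⟨k, hk, hklen, hkeq⟩
    exact ⟨((k : Int), pathlist[k]), ⟨⟨k, hklen, by simp⟩, by simpa using hkeq⟩, hk⟩

-- ===== VERDICT (by name: the statement is the Claim_ definition above) =====
theorem get_funnels_for_session_spec : Claim_equal_get_funnels_for_session := by
  intro pathlist url funlen _ hpre
  unfold Spec_get_funnels_for_session
  by_cases hlt : (pathlist.length : Int) < funlen
  · unfold get_funnels_for_session get_funnels_for_session_alt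
    simp [hlt]
  · by_cases hf : 1 ≤ funlen
    · rw [pv_alt_eq pathlist url funlen hf (by omega)]
      unfold get_funnels_for_session
      simp only [if_neg hlt]
      have h := pv_main pathlist url funlen hf (by omega)
        (((PySem.List.enumerate pathlist).filter (fun p => p.2 == url)).map (fun p => p.1))
        0 PySem.Set.empty le_rfl
        (List.pairwise_map.mpr (List.Pairwise.filter _ (PySem.List.pairwise_lt_enumerate pathlist 0)))
        (by
          intro ix hix
          obtain ⟨k, rfl, hklen, _⟩ := (pv_mem_indices pathlist url ix).mp hix
          constructor <;> [positivity; exact_mod_cast hklen])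
        (by
          intro ix hix
          obtain ⟨k, rfl, hklen, _⟩ := (pv_mem_indices pathlist url ix).mp hix
          omega)
        (by
          intro t ht0 htn
          rw [pv_mem_slice_iff pathlist url funlen t ht0 htn hf]
          constructor
          · rintro ⟨k, ⟨hk1, hk2⟩, hklen, hkeq⟩
            exact ⟨(k : Int), (pv_mem_indices pathlist url (k : Int)).mpr ⟨k, rfl, hklen, hkeq⟩, hk1, hk2⟩
          · rintro ⟨ix, hix, h1, h2⟩
            obtain ⟨k, rfl, hklen, hkeq⟩ := (pv_mem_indices pathlist url ix).mp hix
            exact ⟨k, ⟨h1, h2⟩, hklen, hkeq⟩)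
        (by intro ix _ s hs1 hs2; omega)
      simp only [pv_start_eq, pv_end_eq]
      exact h
    · unfold get_funnels_for_session get_funnels_for_session_alt
      simp only [if_neg hlt]
      have hurl : url ∉ pathlist := by
        rcases hpre with hf1 | hurl
        · exact absurd hf1 hf
        · exact hurl
      have hind : ((PySem.List.enumerate pathlist).filter (fun p => p.2 == url)) = [] := by
        rw [List.filter_eq_nil_iff]
        rintro p hp
        obtain ⟨k, hklen, rfl⟩ := (PySem.List.mem_enumerate_iff pathlist 0 p).mp hp
        simp only [beq_iff_eq]
        intro hcontr
        exact hurl (hcontr ▸ List.getElem_mem hklen)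
      rw [hind, if_pos (show funlen < 1 by omega)]
      simp only [List.map_nil, List.foldl_nil]
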